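-- pv_equiv track=rewrite | github.com/JackYBT/brainup | attention.py | rectify
-- ===== SOURCE A (Python) =====
-- from collections import Counter
--
-- def rectify(array, thr, cnt):
--     kv = Counter(array)
--     key = sorted(kv.keys())
--     for i in range(len(key)-1):
--         if key[i] not in kv:
--             continue
--         for j in range(i+1, len(key)):
--             if abs(key[j] - key[i]) > thr:
--                 break
--             kv[key[i]] += kv.pop(key[j])
--         if kv[key[i]] < cnt:
--             del kv[key[i]]
--     for k in list(kv.keys()):
--         if kv[k] < cnt:
--             del kv[k]
--
--     return len(dict(kv)), dict(kv)
-- ===== SOURCE B (Python) =====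
-- from collections import Counter
--
-- def rectify(array, thr, cnt):
--     c = Counter(array)
--     totals = {}
--     head = None
--     for k in sorted(c):
--         if head is None or k - head > thr:
--             head = k
--             totals[k] = c[k]
--         else:
--             totals[head] += c[k]
--     result = {k: totals[k] for k in c if k in totals and totals[k] >= cnt}
--     return len(result), result
-- ===== Notes on version B (the rewrite author's own statement) =====
-- stated objective: alternative
-- what changed: A's destructive greedy merge (for each surviving sorted key, an inner scan that pops absorbed keys out of the Counter, with repeated dict deletions and a second cleanup pass) is replaced by a single forward pass over the sorted distinct keys that accumulates per-cluster totals from the fixed cluster head, followed by one filtering pass over the Counter's keys in first-occurrence order to reproduce the exact output dict and its key order.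
import Mathlib
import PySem

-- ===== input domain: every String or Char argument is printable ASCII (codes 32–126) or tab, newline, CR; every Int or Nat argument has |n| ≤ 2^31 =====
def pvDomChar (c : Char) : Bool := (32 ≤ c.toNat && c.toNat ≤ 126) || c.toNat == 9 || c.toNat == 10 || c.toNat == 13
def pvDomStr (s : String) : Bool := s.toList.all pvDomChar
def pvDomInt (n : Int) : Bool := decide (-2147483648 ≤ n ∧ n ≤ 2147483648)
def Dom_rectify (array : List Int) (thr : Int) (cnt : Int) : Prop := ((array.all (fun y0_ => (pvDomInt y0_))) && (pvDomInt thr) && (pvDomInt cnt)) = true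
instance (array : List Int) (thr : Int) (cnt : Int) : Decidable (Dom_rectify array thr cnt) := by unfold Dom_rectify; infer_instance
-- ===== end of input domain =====

-- B replaces A's destructive greedy merge (repeated dict pops inside a nested scan,
-- plus a cleanup pass) by a single forward pass over the sorted distinct keys
-- accumulating cluster totals, then one filtering pass over the Counter's keys in
-- first-occurrence order; same return value.

-- ===== PORT A =====
-- inner loop: `for j in range(i+1, len(key)): if abs(key[j]-key[i]) > thr: break; kv[key[i]] += kv.pop(key[j])`
-- (the list argument is key[i+1:], traversed element by element exactly as the index loop does)
def innerA (thr : Int) (ki : Int) : List Int → PySem.Dict Int Int → PySem.Dict Int Int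
  | [], kv => kv
  | j :: js, kv =>
    if thr < |j - ki| then kv          -- break
    else
      match kv.pop? j with
      | some (v, kv') => innerA thr ki js (kv'.modify ki 0 (· + v))   -- kv[key[i]] += kv.pop(key[j])
      | none => kv                     -- Python would raise KeyError; never reached (key[j] is present whenever key[i] is)

-- outer loop: `for i in range(len(key)-1)`, so the last element is never a head
def outerA (thr : Int) (cnt : Int) : List Int → PySem.Dict Int Int → PySem.Dict Int Int
  | [], kv => kv
  | [_], kv => kv
  | k :: rest, kv =>
    outerA thr cnt rest
      (if kv.contains k then
        let kv1 := innerA thr k rest kv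
        if kv1.getD k 0 < cnt then kv1.erase k else kv1
      else kv)

def rectify (array : List Int) (thr : Int) (cnt : Int) : Int × (List (Int × Int)) :=
  let kv := PySem.Dict.counter array
  let key := PySem.List.sorted kv.keys (fun x => x) false
  let kv2 := outerA thr cnt key kv
  -- `for k in list(kv.keys()): if kv[k] < cnt: del kv[k]`
  let kv3 := kv2.keys.foldl (fun d k => if d.getD k 0 < cnt then d.erase k else d) kv2
  ((kv3.items.length : Int), kv3.items)

-- ===== PORT B =====
-- one forward pass over the sorted distinct keys: state = (totals dict, current cluster head)
def stepB (c : PySem.Dict Int Int) (thr : Int)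
    (st : PySem.Dict Int Int × Option Int) (k : Int) : PySem.Dict Int Int × Option Int :=
  match st.2 with
  | none => (st.1.insert k (c.getD k 0), some k)
  | some h =>
    if thr < k - h then (st.1.insert k (c.getD k 0), some k)
    else (st.1.modify h 0 (· + c.getD k 0), st.2)

def rectify_alt (array : List Int) (thr : Int) (cnt : Int) : Int × (List (Int × Int)) :=
  let c := PySem.Dict.counter array
  let totals := ((PySem.List.sorted c.keys (fun x => x) false).foldl (stepB c thr)
    (PySem.Dict.empty, none)).1
  -- `{k: totals[k] for k in c if k in totals and totals[k] >= cnt}`: c's keys are distinct,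
  -- so the comprehension appends its entries in c's key order
  let result := c.keys.filterMap (fun k =>
    if totals.contains k && decide (cnt ≤ totals.getD k 0) then some (k, totals.getD k 0) else none)
  ((result.length : Int), result)

-- ===== PRECONDITION & SPEC =====
def Spec_rectify (array : List Int) (thr : Int) (cnt : Int) (out : Int × (List (Int × Int))) : Prop := out = rectify_alt array thr cnt
instance (array : List Int) (thr : Int) (cnt : Int) (out : Int × (List (Int × Int))) : Decidable (Spec_rectify array thr cnt out) := by unfold Spec_rectify; infer_instance

-- ===== CLAIM (what is proved, stated in full; the proofs are below) =====
def Claim_equal_rectify : Prop := ∀ (array : List Int) (thr : Int) (cnt : Int), Dom_rectify array thr cnt → Spec_rectify array thr cnt (rectify array thr cnt)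

-- ===== LEMMAS AND PROOFS =====

-- greedy cluster decomposition of a (strictly increasing) key list
def clusters (thr : Int) : List Int → List (Int × List Int)
  | [] => []
  | k :: ks =>
    (k, ks.takeWhile (fun j => decide (j - k ≤ thr))) ::
      clusters thr (ks.dropWhile (fun j => decide (j - k ≤ thr)))
  termination_by ks => ks.length
  decreasing_by
    simp only [List.length_cons]
    exact Nat.lt_succ_of_le (List.length_dropWhile_le _ _)

def totList (c : PySem.Dict Int Int) (L : List (Int × List Int)) : List (Int × Int) :=
  L.map (fun p => (p.1, c.getD p.1 0 + (p.2.map (fun j => c.getD j 0)).sum))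

-- final role of a key: surviving head ↦ its cluster total
def roleL (cnt : Int) (tl : List (Int × Int)) (k : Int) : Option (Int × Int) :=
  match tl.lookup k with
  | some t => if t < cnt then none else some (k, t)
  | none => none

-- what outerA (alone, before the final filtering pass) does to the entry of key k of R
def outSpec (thr : Int) (cnt : Int) (c : PySem.Dict Int Int) : List Int → Int → Option (Int × Int)
  | [], _ => none
  | k0 :: ks, k =>
    let mem := ks.takeWhile (fun j => decide (j - k0 ≤ thr))
    let t := c.getD k0 0 + (mem.map (fun j => c.getD j 0)).sum
    if k = k0 then
      if ks = [] then some (k0, t)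
      else if t < cnt then none else some (k0, t)
    else if k ∈ mem then none
    else outSpec thr cnt c (ks.dropWhile (fun j => decide (j - k0 ≤ thr))) k
  termination_by ks _ => ks.length
  decreasing_by
    simp only [List.length_cons]
    exact Nat.lt_succ_of_le (List.length_dropWhile_le _ _)

def flatC (L : List (Int × List Int)) : List Int := L.flatMap (fun p => p.1 :: p.2)

lemma flat_clusters (thr : Int) (ks : List Int) : flatC (clusters thr ks) = ks := by
  fun_induction clusters thr ks with
  | case1 => rfl
  | case2 k ks ih =>
    simp only [flatC, List.flatMap_cons] at *
    rw [ih]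
    simp [List.takeWhile_append_dropWhile]

-- generic Dict-as-list lemmas
def keyPres (g : Int × Int → Option (Int × Int)) : Prop := ∀ p q, g p = some q → q.1 = p.1

lemma fst_filterMap_sublist (l : List (Int × Int)) (g : Int × Int → Option (Int × Int))
    (hg : keyPres g) : ((l.filterMap g).map (·.1)).Sublist (l.map (·.1)) := by
  induction l with
  | nil => simp
  | cons p t ih =>
    simp only [List.filterMap_cons]
    cases hq : g p with
    | none => exact (List.map_cons ▸ ih.cons p.1 : _)
    | some q =>
      simp only [List.map_cons, hg p q hq]
      exact ih.cons₂ p.1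

lemma get?_mk_filterMap (l : List (Int × Int)) (g : Int × Int → Option (Int × Int))
    (hg : keyPres g) (hnd : (l.map (·.1)).Nodup) (x : Int) :
    (PySem.Dict.mk (l.filterMap g)).get? x = ((PySem.Dict.mk l).get? x).bind (fun v => (g (x, v)).map (·.2)) := by
  induction l with
  | nil => simp [PySem.Dict.get?]
  | cons p t ih =>
    obtain ⟨k, v⟩ := p
    simp only [List.map_cons, List.nodup_cons] at hnd
    simp only [List.filterMap_cons]
    by_cases hx : k = x
    · subst hx
      cases hq : g (k, v) with
      | none =>
        rw [PySem.Dict.get?_mk_cons]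
        have h1 : ({ items := List.filterMap g t } : PySem.Dict Int Int).get? k = none := by
          rw [PySem.Dict.get?_eq_none_iff_not_mem_keys]
          intro hmem
          exact hnd.1 (List.Sublist.mem hmem (by simpa [PySem.Dict.keys] using fst_filterMap_sublist t g hg))
        rw [h1]
        simp [hq]
      | some q =>
        obtain ⟨qk, qv⟩ := q
        have hq1 : qk = k := hg _ _ hq
        subst hq1
        rw [PySem.Dict.get?_mk_cons, PySem.Dict.get?_mk_cons]
        simp [hq]
    · have hne : (k == x) = false := by simpa using hx
      cases hq : g (k, v) with
      | none =>
        rw [ih hnd.2, PySem.Dict.get?_mk_cons, hne]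
        simp
      | some q =>
        obtain ⟨qk, qv⟩ := q
        have hq1 : qk = k := hg _ _ hq
        subst hq1
        rw [PySem.Dict.get?_mk_cons, PySem.Dict.get?_mk_cons, hne]
        simp only [Bool.false_eq_true, if_false]
        exact ih hnd.2

lemma get?_foldl_insert (L : List (Int × Int)) (d : PySem.Dict Int Int)
    (hnd : (L.map (·.1)).Nodup) (x : Int) :
    (L.foldl (fun d p => d.insert p.1 p.2) d).get? x =
      if x ∈ L.map (·.1) then L.lookup x else d.get? x := by
  induction L generalizing d with
  | nil => simp
  | cons p t ih =>
    simp only [List.map_cons, List.nodup_cons] at hnd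
    simp only [List.foldl_cons]
    rw [ih _ hnd.2]
    by_cases hm : x ∈ t.map (·.1)
    · have hne : p.1 ≠ x := fun h => hnd.1 (h ▸ hm)
      have : (x == p.1) = false := by simpa using Ne.symm hne
      simp [hm, List.lookup, this]
    · by_cases hx : x = p.1
      · subst hx
        simp [hm, List.lookup]
      · simp [hm, hx, PySem.Dict.get?_insert]

-- small consequences of the generic lemmas
lemma nodup_keys_mk_filterMap (l : List (Int × Int)) (g : Int × Int → Option (Int × Int))
    (hg : keyPres g) (hnd : (l.map (·.1)).Nodup) : ((l.filterMap g).map (·.1)).Nodup :=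
  hnd.sublist (fst_filterMap_sublist l g hg)

lemma get?_erase (d : PySem.Dict Int Int) (hnd : d.keys.Nodup) (k x : Int) :
    (d.erase k).get? x = (d.get? x).bind (fun v => if x == k then none else some (v : Int)) := by
  obtain ⟨l⟩ := d
  have hfe : l.filter (fun p => !(p.1 == k)) =
      l.filterMap (fun p => if p.1 == k then none else some p) := by
    rw [← List.filterMap_eq_filter]
    exact List.filterMap_congr (fun p _ => by by_cases h : p.1 = k <;> simp [h])
  have := get?_mk_filterMap l (fun p => if p.1 == k then none else some p)
    (fun p q hq => by by_cases h : p.1 = k <;> simp [h] at hq <;> simp [← hq])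
    (by simpa [PySem.Dict.keys] using hnd) x
  rw [PySem.Dict.erase, hfe, this]
  by_cases h : x = k <;> simp [h]

lemma heads_sublist_flatC (L : List (Int × List Int)) : (L.map (·.1)).Sublist (flatC L) := by
  induction L with
  | nil => simp [flatC]
  | cons p t ih =>
    simp only [flatC, List.flatMap_cons, List.map_cons]
    exact (ih.trans (List.sublist_append_right _ _)).cons₂ p.1

lemma lookup_totList_none (c : PySem.Dict Int Int) (L : List (Int × List Int)) (x : Int)
    (hx : x ∉ flatC L) : (totList c L).lookup x = none := by
  induction L with
  | nil => rfl
  | cons p t ih =>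
    simp only [flatC, List.flatMap_cons, List.mem_append, List.mem_cons, not_or] at hx
    have hne : (x == p.1) = false := by simpa using hx.1.1
    simp only [totList, List.map_cons, List.lookup, hne]
    exact ih (by simp only [flatC]; exact fun h => hx.2 h)

lemma dropWhile_head_false {α : Type} (p : α → Bool) (l : List α) (x : α) (xs : List α)
    (h : l.dropWhile p = x :: xs) : p x = false := by
  induction l with
  | nil => simp at h
  | cons a t ih =>
    rw [List.dropWhile_cons] at h
    by_cases ha : p a = true
    · exact ih (by simpa [ha] using h)
    · simp [ha] at h
      obtain ⟨h1, _⟩ := h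
      subst h1
      simpa using ha

lemma nodup_keys_erase (d : PySem.Dict Int Int) (k : Int) (hnd : d.keys.Nodup) :
    (d.erase k).keys.Nodup := by
  obtain ⟨l⟩ := d
  simpa [PySem.Dict.keys, PySem.Dict.erase] using
    (by simpa [PySem.Dict.keys] using hnd : (l.map (·.1)).Nodup).sublist
      ((l.filter_sublist (p := fun p => !(p.1 == k))).map (·.1))

lemma filterMap_filter_map (l : List (Int × Int)) (q : Int × Int → Bool)
    (r : Int × Int → Int × Int) (g : Int × Int → Option (Int × Int)) :
    ((l.filter q).map r).filterMap g = l.filterMap (fun p => if q p then g (r p) else none) := by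
  rw [List.filterMap_map, ← List.filterMap_eq_filter, List.filterMap_filterMap]
  exact List.filterMap_congr (fun p _ => by by_cases h : q p <;> simp [h])

lemma filter_filterMap_compose (l : List (Int × Int)) (g : Int × Int → Option (Int × Int))
    (q : Int × Int → Bool) :
    (l.filterMap g).filter q = l.filterMap (fun p => (g p).bind (fun y => if q y then some y else none)) := by
  rw [← List.filterMap_eq_filter, List.filterMap_filterMap]
  exact List.filterMap_congr (fun p _ => by cases hgp : g p <;> simp [Option.guard])

-- ===== A-side lemmas =====

lemma innerA_items (thr k0 : Int) :
    ∀ (mem rest : List Int) (kv : PySem.Dict Int Int),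
      (∀ j ∈ mem, k0 < j ∧ j - k0 ≤ thr) →
      (∀ j ∈ mem, (kv.get? j).isSome) →
      mem.Nodup →
      kv.keys.Nodup →
      (kv.get? k0).isSome →
      (rest = [] ∨ ∃ r rs, rest = r :: rs ∧ thr < |r - k0|) →
      (innerA thr k0 (mem ++ rest) kv).items =
        kv.items.filterMap (fun p =>
          if p.1 ∈ mem then none
          else if p.1 = k0 then some (k0, kv.getD k0 0 + (mem.map (fun j => kv.getD j 0)).sum)
          else some p) := by
  intro mem
  induction mem with
  | nil =>
    intro rest kv _ _ _ hndk hk0 hb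
    have hid : kv.items.filterMap (fun p =>
        if p.1 ∈ ([] : List Int) then none
        else if p.1 = k0 then some (k0, kv.getD k0 0 + (([] : List Int).map (fun j => kv.getD j 0)).sum)
        else some p) = kv.items := by
      have hcg : ∀ p ∈ kv.items, (if p.1 ∈ ([] : List Int) then none
          else if p.1 = k0 then some (k0, kv.getD k0 0 + (([] : List Int).map (fun j => kv.getD j 0)).sum)
          else some p) = some p := by
        intro p hp
        simp only [List.not_mem_nil, if_false, List.map_nil, List.sum_nil, add_zero]
        by_cases h : p.1 = k0
        · have hv : kv.getD p.1 0 = p.2 := PySem.Dict.getD_of_mem_items kv hp hndk 0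
          rw [if_pos h, ← h, hv]
        · simp [h]
      rw [List.filterMap_congr hcg, List.filterMap_some]
    rw [List.nil_append, hid]
    rcases hb with rfl | ⟨r, rs, rfl, habs⟩
    · rfl
    · show (if thr < |r - k0| then kv else _).items = kv.items
      rw [if_pos habs]
  | cons j t ih =>
    intro rest kv hmem hsome hnd hndk hk0 hb
    obtain ⟨hj1, hj2⟩ := hmem j (by simp)
    have habs : ¬ thr < |j - k0| := by
      rw [abs_of_pos (by omega : (0:Int) < j - k0)]; omega
    obtain ⟨vj, hvj⟩ := Option.isSome_iff_exists.mp (hsome j (by simp))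
    have hpop : kv.pop? j = some (vj, kv.erase j) := by simp [PySem.Dict.pop?, hvj]
    have hjk0 : j ≠ k0 := by omega
    have hvj' : vj = kv.getD j 0 := by simp [PySem.Dict.getD_eq_get?_getD, hvj]
    obtain ⟨v0, hv0⟩ := Option.isSome_iff_exists.mp hk0
    have hge : (kv.erase j).get? k0 = some v0 := by
      rw [get?_erase kv hndk j k0, hv0]
      simp [Ne.symm hjk0]
    have hgeD : (kv.erase j).getD k0 0 = kv.getD k0 0 := by
      simp [PySem.Dict.getD_eq_get?_getD, hge, hv0]
    have hcon : (kv.erase j).contains k0 = true := by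
      rw [PySem.Dict.contains_eq_isSome_get?, hge]; rfl
    have hkv'def : (kv.erase j).modify k0 0 (· + vj) =
        (kv.erase j).insert k0 (kv.getD k0 0 + vj) := by
      rw [PySem.Dict.modify, hgeD]
    set kv' := (kv.erase j).insert k0 (kv.getD k0 0 + vj) with hkv'
    have hstep : innerA thr k0 ((j :: t) ++ rest) kv = innerA thr k0 (t ++ rest) kv' := by
      rw [List.cons_append, innerA, if_neg habs, hpop]
      show innerA thr k0 (t ++ rest) ((kv.erase j).modify k0 0 (· + vj)) = _
      rw [hkv'def]
    have hek : (kv.erase j).keys.Nodup := nodup_keys_erase kv j hndk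
    have hget' : ∀ x, x ≠ k0 → x ≠ j → kv'.get? x = kv.get? x := by
      intro x hx1 hx2
      rw [hkv', PySem.Dict.get?_insert, if_neg hx1, get?_erase kv hndk j x]
      cases h : kv.get? x with
      | none => rfl
      | some v => simp [beq_eq_false_iff_ne.2 hx2]
    have hndk' : kv'.keys.Nodup := by
      rw [hkv']
      exact PySem.Dict.nodup_keys_insert _ _ _ hek
    rw [hstep, ih rest kv'
      (fun j' hj' => hmem j' (by simp [hj']))
      (fun j' hj' => by
        obtain ⟨h1, _⟩ := hmem j' (by simp [hj'])
        rw [hget' j' (by omega) (fun h => (List.nodup_cons.mp hnd).1 (h ▸ hj'))]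
        exact hsome j' (by simp [hj']))
      (List.nodup_cons.mp hnd).2 hndk'
      (by rw [hkv', PySem.Dict.get?_insert_self]; rfl) hb]
    have hitems' : kv'.items = (kv.items.filter (fun p => !(p.1 == j))).map
        (fun p => if p.1 == k0 then (k0, kv.getD k0 0 + vj) else p) := by
      rw [hkv', PySem.Dict.items_insert_of_contains _ _ hcon]
      rfl
    rw [hitems', filterMap_filter_map]
    apply List.filterMap_congr
    intro p hp
    by_cases hpj : p.1 = j
    · simp [hpj]
    · have hq : (!(p.1 == j)) = true := by simpa using hpj
      rw [if_pos hq]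
      by_cases hpk : p.1 = k0
      · have hk0t : k0 ∉ t := fun h => by have := (hmem k0 (by simp [h])).1; omega
        have hrep : (if p.1 == k0 then (k0, kv.getD k0 0 + vj) else p) =
            (k0, kv.getD k0 0 + vj) := by simp [hpk]
        have hsum : t.map (fun j' => kv'.getD j' 0) = t.map (fun j' => kv.getD j' 0) := by
          apply List.map_congr_left
          intro j' hj'
          have h1 := (hmem j' (by simp [hj'])).1
          rw [PySem.Dict.getD_eq_get?_getD, PySem.Dict.getD_eq_get?_getD,
            hget' j' (by omega) (fun h => (List.nodup_cons.mp hnd).1 (h ▸ hj'))]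
        rw [hrep]
        simp only [hpk, hsum]
        rw [hkv', PySem.Dict.getD_insert_self]
        simp [hk0t, Ne.symm hjk0, hvj', add_assoc]
      · have hrep : (if p.1 == k0 then (k0, kv.getD k0 0 + vj) else p) = p := by
          simp [hpk]
        rw [hrep]
        simp [hpj, hpk]

lemma outerA_skip (thr cnt : Int) :
    ∀ (mem R : List Int) (kv : PySem.Dict Int Int),
      (∀ m ∈ mem, kv.contains m = false) →
      outerA thr cnt (mem ++ R) kv = outerA thr cnt R kv := by
  intro mem
  induction mem with
  | nil => intro R kv _; rfl
  | cons m t ih =>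
    intro R kv h
    have hm : kv.contains m = false := h m (by simp)
    cases hl : t ++ R with
    | nil =>
      obtain ⟨ht, hR⟩ := List.append_eq_nil_iff.mp hl
      subst ht; subst hR; rfl
    | cons x xs =>
      have h1 : outerA thr cnt (m :: t ++ R) kv = outerA thr cnt (t ++ R) kv := by
        rw [List.cons_append, hl]
        show outerA thr cnt (x :: xs) (if kv.contains m = true then _ else kv) = _
        rw [hm]
        simp
      rw [List.cons_append] at h1 ⊢
      rw [h1]
      exact ih R kv (fun m' hm' => h m' (by simp [hm']))

lemma outerA_items (thr cnt : Int) (c : PySem.Dict Int Int) :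
    ∀ (n : Nat) (R : List Int) (kv : PySem.Dict Int Int), R.length ≤ n →
      R.Pairwise (· < ·) →
      (∀ j ∈ R, kv.get? j = some (c.getD j 0)) →
      kv.keys.Nodup →
      (outerA thr cnt R kv).items =
        kv.items.filterMap (fun p => if p.1 ∈ R then outSpec thr cnt c R p.1 else some p) := by
  intro n
  induction n with
  | zero =>
    intro R kv hlen _ _ _
    have : R = [] := List.eq_nil_of_length_eq_zero (Nat.le_zero.mp hlen)
    subst this
    simp [show outerA thr cnt [] kv = kv from rfl]
  | succ n ih =>
    intro R kv hlen hpw hinv hndk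
    match R with
    | [] => simp [show outerA thr cnt [] kv = kv from rfl]
    | [k0] =>
      show kv.items = kv.items.filterMap _
      have hcg : ∀ p ∈ kv.items,
          (if p.1 ∈ [k0] then outSpec thr cnt c [k0] p.1 else some p) = some p := by
        intro p hp
        by_cases h : p.1 = k0
        · have hv : kv.getD p.1 0 = p.2 := PySem.Dict.getD_of_mem_items kv hp hndk 0
          have hg : kv.get? k0 = some (c.getD k0 0) := hinv k0 (by simp)
          have hgD : c.getD k0 0 = kv.getD k0 0 := by
            rw [PySem.Dict.getD_eq_get?_getD kv, hg]; rfl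
          rw [if_pos (by simp [h]), outSpec, if_pos h]
          simp only [List.takeWhile_nil, List.map_nil, List.sum_nil, add_zero]
          rw [hgD, ← h, hv]
          simp
        · simp [h]
      rw [List.filterMap_congr hcg, List.filterMap_some]
    | k0 :: k1 :: ks' =>
      have hkscons : k1 :: ks' ≠ [] := by simp
      set p' : Int → Bool := fun j => decide (j - k0 ≤ thr) with hp'
      set mem := (k1 :: ks').takeWhile p' with hmemdef
      set rest := (k1 :: ks').dropWhile p' with hrestdef
      have hks : mem ++ rest = k1 :: ks' := List.takeWhile_append_dropWhile
      have hk0lt : ∀ j ∈ k1 :: ks', k0 < j := (List.pairwise_cons.mp hpw).1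
      have hpw' : (k1 :: ks').Pairwise (· < ·) := (List.pairwise_cons.mp hpw).2
      have ksnd : (k1 :: ks').Nodup := hpw'.imp ne_of_lt
      obtain ⟨memnd, restnd, hdisj⟩ := List.nodup_append.mp (hks ▸ ksnd)
      have hmemc : ∀ j ∈ mem, k0 < j ∧ j - k0 ≤ thr := by
        intro j hj
        refine ⟨hk0lt j ((List.takeWhile_sublist p').subset hj), ?_⟩
        have := List.mem_takeWhile_imp hj
        simpa [hp'] using this
      have hbnd : rest = [] ∨ ∃ r rs, rest = r :: rs ∧ thr < |r - k0| := by
        cases hr : rest with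
        | nil => exact Or.inl rfl
        | cons r rs =>
          refine Or.inr ⟨r, rs, rfl, ?_⟩
          have h1 := dropWhile_head_false p' (k1 :: ks') r rs (hrestdef ▸ hr)
          have h2 : k0 < r := hk0lt r (by rw [← hks, hr]; simp)
          have h3 : ¬ (r - k0 ≤ thr) := by simpa [hp'] using h1
          rw [abs_of_pos (by omega : (0:Int) < r - k0)]
          omega
      have hrsub : ∀ j ∈ rest, j ∈ k1 :: ks' := fun j hj => (List.dropWhile_sublist p').subset hj
      have hmsub : ∀ j ∈ mem, j ∈ k1 :: ks' := fun j hj => (List.takeWhile_sublist p').subset hj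
      have hk0g : kv.get? k0 = some (c.getD k0 0) := hinv k0 (by simp)
      have hcont : kv.contains k0 = true := by
        rw [PySem.Dict.contains_eq_isSome_get?, hk0g]; rfl
      have hk0nm : k0 ∉ mem := fun h => by have := (hmemc k0 h).1; omega
      have hk0nr : k0 ∉ rest := fun h => by have := hk0lt k0 (hrsub k0 h); omega
      -- the value the head accumulates
      set t : Int := c.getD k0 0 + (mem.map (fun j => c.getD j 0)).sum with ht
      have hSeq : kv.getD k0 0 + (mem.map (fun j => kv.getD j 0)).sum = t := by
        rw [ht]
        congr 1
        · rw [PySem.Dict.getD_eq_get?_getD, hk0g]; rfl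
        · congr 1
          apply List.map_congr_left
          intro j hj
          rw [PySem.Dict.getD_eq_get?_getD, hinv j (List.mem_cons_of_mem _ (hmsub j hj))]; rfl
      -- inner loop
      have hinner : (innerA thr k0 (k1 :: ks') kv).items = kv.items.filterMap (fun p =>
          if p.1 ∈ mem then none
          else if p.1 = k0 then some (k0, t)
          else some p) := by
        rw [← hks]
        rw [innerA_items thr k0 mem rest kv hmemc
          (fun j hj => by rw [hinv j (List.mem_cons_of_mem _ (hmsub j hj))]; rfl)
          memnd hndk (by rw [hk0g]; rfl) hbnd]
        rw [hSeq]
      set kv1 := innerA thr k0 (k1 :: ks') kv with hkv1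
      have hkv1mk : kv1 = PySem.Dict.mk (kv.items.filterMap (fun p =>
          if p.1 ∈ mem then none
          else if p.1 = k0 then some (k0, t)
          else some p)) := PySem.Dict.ext hinner
      have hkeyPres1 : keyPres (fun p =>
          if p.1 ∈ mem then none
          else if p.1 = k0 then some ((k0 : Int), t)
          else some p) := by
        intro p q hq
        by_cases h1 : p.1 ∈ mem
        · simp [h1] at hq
        · by_cases h2 : p.1 = k0
          · simp only [if_neg h1, if_pos h2] at hq
            cases hq
            simp [h2]
          · simp only [if_neg h1, if_neg h2] at hq
            cases hq
            rfl
      have hndl : (kv.items.map (·.1)).Nodup := by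
        simpa [PySem.Dict.keys] using hndk
      have hkv1get : ∀ x, kv1.get? x = (kv.get? x).bind (fun v =>
          ((fun p : Int × Int =>
            if p.1 ∈ mem then none
            else if p.1 = k0 then some ((k0 : Int), t)
            else some p) (x, v)).map (·.2)) := by
        intro x
        rw [hkv1mk, get?_mk_filterMap _ _ hkeyPres1 hndl]
      have hkv1D : kv1.getD k0 0 = t := by
        rw [PySem.Dict.getD_eq_get?_getD, hkv1get k0, hk0g]
        simp [hk0nm]
      -- the head survives or dies
      set f2 : Int × Int → Option (Int × Int) := fun p =>
        if p.1 ∈ mem then none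
        else if p.1 = k0 then (if t < cnt then none else some (k0, t))
        else some p with hf2
      have hkeyPres2 : keyPres f2 := by
        intro p q hq
        rw [hf2] at hq
        by_cases h1 : p.1 ∈ mem
        · simp [h1] at hq
        · by_cases h2 : p.1 = k0
          · simp only [if_neg h1, if_pos h2] at hq
            by_cases h3 : t < cnt
            · simp [h3] at hq
            · simp only [if_neg h3] at hq
              cases hq
              simp [h2]
          · simp only [if_neg h1, if_neg h2] at hq
            cases hq
            rfl
      set kv2 := if kv1.getD k0 0 < cnt then kv1.erase k0 else kv1 with hkv2
      have hkv2items : kv2.items = kv.items.filterMap f2 := by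
        rw [hkv2, hkv1D]
        by_cases h3 : t < cnt
        · rw [if_pos h3]
          have : (kv1.erase k0).items = kv1.items.filter (fun p => !(p.1 == k0)) := rfl
          rw [this, hinner, filter_filterMap_compose]
          apply List.filterMap_congr
          intro p _
          by_cases h1 : p.1 ∈ mem
          · simp [hf2, h1]
          · by_cases h2 : p.1 = k0
            · simp [hf2, h2, h3]
            · simp [hf2, h1, h2]
        · rw [if_neg h3, hinner]
          apply List.filterMap_congr
          intro p _
          by_cases h1 : p.1 ∈ mem
          · simp [hf2, h1]
          · by_cases h2 : p.1 = k0
            · simp [hf2, h2, h3]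
            · simp [hf2, h1, h2]
      have hkv2mk : kv2 = PySem.Dict.mk (kv.items.filterMap f2) := PySem.Dict.ext hkv2items
      have hkv2get : ∀ x, kv2.get? x = (kv.get? x).bind (fun v => (f2 (x, v)).map (·.2)) := by
        intro x
        rw [hkv2mk, get?_mk_filterMap _ _ hkeyPres2 hndl]
      -- one unfolding of the outer loop
      have houter : outerA thr cnt (k0 :: k1 :: ks') kv = outerA thr cnt (k1 :: ks') kv2 := by
        show outerA thr cnt (k1 :: ks')
            (if kv.contains k0 = true then
              if (innerA thr k0 (k1 :: ks') kv).getD k0 0 < cnt then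
                (innerA thr k0 (k1 :: ks') kv).erase k0
              else innerA thr k0 (k1 :: ks') kv
            else kv) = outerA thr cnt (k1 :: ks') kv2
        rw [hcont, if_pos rfl]
      -- members of the merged cluster are gone: skip them
      have hskip : ∀ m ∈ mem, kv2.contains m = false := by
        intro m hm
        rw [PySem.Dict.contains_eq_isSome_get?, hkv2get m]
        cases h : kv.get? m with
        | none => rfl
        | some v => simp [hf2, hm]
      -- invariant for the remaining keys
      have hinv' : ∀ j ∈ rest, kv2.get? j = some (c.getD j 0) := by
        intro j hj
        have hjk0 : j ≠ k0 := fun h => hk0nr (h ▸ hj)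
        have hjm : j ∉ mem := fun h => (hdisj j h j hj) rfl
        rw [hkv2get j, hinv j (List.mem_cons_of_mem _ (hrsub j hj))]
        simp [hf2, hjm, hjk0]
      have hndk2 : kv2.keys.Nodup := by
        rw [hkv2mk]
        simpa [PySem.Dict.keys] using nodup_keys_mk_filterMap _ _ hkeyPres2 hndl
      have hlen' : rest.length ≤ n := by
        have h1 := List.length_dropWhile_le p' (k1 :: ks')
        simp only [List.length_cons] at hlen h1 ⊢
        rw [hrestdef]
        omega
      have houter2 : outerA thr cnt (k1 :: ks') kv2 = outerA thr cnt rest kv2 := by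
        conv_lhs => rw [← hks]
        exact outerA_skip thr cnt mem rest kv2 hskip
      rw [houter, houter2,
        ih rest kv2 hlen' (hpw'.sublist (List.dropWhile_sublist p')) hinv' hndk2,
        hkv2items, List.filterMap_filterMap]
      apply List.filterMap_congr
      intro p _
      by_cases h1 : p.1 ∈ mem
      · have hpR : p.1 ∈ k0 :: k1 :: ks' := by rw [← hks]; simp [h1]
        have hpk0 : p.1 ≠ k0 := fun h => hk0nm (h ▸ h1)
        rw [if_pos hpR, outSpec, ← hp', ← hmemdef]
        simp [hf2, h1, hpk0]
      · by_cases h2 : p.1 = k0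
        · have hpR : p.1 ∈ k0 :: k1 :: ks' := by simp [h2]
          rw [if_pos hpR, outSpec, ← hp', ← hmemdef, ← ht]
          simp only [h2, if_neg hkscons]
          by_cases h3 : t < cnt
          · simp [hf2, h2, h3]
          · simp [hf2, h2, h3, hk0nm, hk0nr]
        · by_cases h4 : p.1 ∈ rest
          · have hpR : p.1 ∈ k0 :: k1 :: ks' := by rw [← hks]; simp [h4]
            rw [if_pos hpR, outSpec, ← hp', ← hmemdef, ← hrestdef]
            simp [hf2, h1, h2, h4]
          · have hpR : p.1 ∉ k0 :: k1 :: ks' := by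
              rw [← hks]
              simp [h1, h2, h4]
            rw [if_neg hpR]
            simp [hf2, h1, h2, h4]

lemma finalFilter (cnt : Int) :
    ∀ (ks : List Int) (d : PySem.Dict Int Int), ks.Nodup → d.keys.Nodup →
      (ks.foldl (fun d k => if d.getD k 0 < cnt then d.erase k else d) d).items =
        d.items.filter (fun p => !(decide (p.1 ∈ ks) && decide (p.2 < cnt))) := by
  intro ks
  induction ks with
  | nil => intro d _ _; simp
  | cons k t ih =>
    intro d hnd hdk
    simp only [List.nodup_cons] at hnd
    simp only [List.foldl_cons]
    by_cases hlt : d.getD k 0 < cnt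
    · rw [if_pos hlt]
      have hek : (d.erase k).keys.Nodup := by
        obtain ⟨l⟩ := d
        simpa [PySem.Dict.keys, PySem.Dict.erase] using
          (by simpa [PySem.Dict.keys] using hdk : (l.map (·.1)).Nodup).sublist
            ((l.filter_sublist (p := fun p => !(p.1 == k))).map (·.1))
      rw [ih _ hnd.2 hek]
      show ((d.items.filter _).filter _) = _
      rw [List.filter_filter]
      apply List.filter_congr
      intro p hp
      by_cases hpk : p.1 = k
      · have : p.2 = d.getD p.1 0 := (PySem.Dict.getD_of_mem_items d hp hdk 0).symm
        simp [hpk, this]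
        exact hlt
      · simp [hpk]
    · rw [if_neg hlt]
      rw [ih _ hnd.2 hdk]
      apply List.filter_congr
      intro p hp
      by_cases hpk : p.1 = k
      · have hv : p.2 = d.getD p.1 0 := (PySem.Dict.getD_of_mem_items d hp hdk 0).symm
        have hkt : p.1 ∉ t := hpk ▸ hnd.1
        simp [hpk, hv]
        exact fun _ => not_lt.mp hlt
      · simp [hpk]

lemma outSpec_roleL (thr cnt : Int) (c : PySem.Dict Int Int) :
    ∀ (n : Nat) (R : List Int), R.length ≤ n → R.Pairwise (· < ·) → ∀ k ∈ R,
      (outSpec thr cnt c R k).bind (fun q => if q.2 < cnt then none else some q)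
        = roleL cnt (totList c (clusters thr R)) k := by
  intro n
  induction n with
  | zero =>
    intro R hlen _ k hk
    have : R = [] := List.eq_nil_of_length_eq_zero (Nat.le_zero.mp hlen)
    subst this
    simp at hk
  | succ n ih =>
    intro R hlen hpw k hk
    cases R with
    | nil => simp at hk
    | cons k0 ks =>
      have hpw' : ks.Pairwise (· < ·) := (List.pairwise_cons.mp hpw).2
      set p' : Int → Bool := fun j => decide (j - k0 ≤ thr) with hp'
      set mem := ks.takeWhile p' with hmemdef
      set rest := ks.dropWhile p' with hrestdef
      have hks : mem ++ rest = ks := List.takeWhile_append_dropWhile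
      obtain ⟨memnd, restnd, hdisj⟩ := List.nodup_append.mp (hks ▸ (hpw'.imp ne_of_lt))
      rw [outSpec, clusters, ← hp', ← hmemdef, ← hrestdef]
      set t : Int := c.getD k0 0 + (mem.map (fun j => c.getD j 0)).sum with ht
      by_cases h2 : k = k0
      · subst h2
        have hlk : (totList c ((k, mem) :: clusters thr rest)).lookup k = some t := by
          simp [totList]
          exact ht.symm
        by_cases hksnil : ks = [] <;> by_cases h3 : t < cnt <;>
          simp [hksnil, h3, roleL, hlk]
      · have hstep : (totList c ((k0, mem) :: clusters thr rest)).lookup k =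
            (totList c (clusters thr rest)).lookup k := by
          have : (k == k0) = false := by simpa using h2
          simp [totList, List.lookup, this]
        rw [if_neg h2]
        by_cases h1 : k ∈ mem
        · rw [if_pos h1]
          have hnr : (totList c (clusters thr rest)).lookup k = none := by
            apply lookup_totList_none
            rw [flat_clusters]
            exact fun hr => (hdisj k h1 k hr) rfl
          simp [roleL, hstep, hnr]
        · rw [if_neg h1]
          have hkrest : k ∈ rest := by
            have hkks : k ∈ ks := (List.mem_cons.mp hk).resolve_left h2
            rw [← hks] at hkks
            exact (List.mem_append.mp hkks).resolve_left h1
          have hlen' : rest.length ≤ n := by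
            have h1 := List.length_dropWhile_le p' ks
            simp only [List.length_cons] at hlen
            rw [hrestdef]
            omega
          rw [ih rest hlen' (hpw'.sublist (List.dropWhile_sublist p')) k hkrest]
          unfold roleL
          rw [hstep]

lemma outSpec_key (thr cnt : Int) (c : PySem.Dict Int Int) :
    ∀ (n : Nat) (R : List Int), R.length ≤ n → ∀ (k : Int) (q : Int × Int),
      outSpec thr cnt c R k = some q → q.1 = k := by
  intro n
  induction n with
  | zero =>
    intro R hlen k q h
    have : R = [] := List.eq_nil_of_length_eq_zero (Nat.le_zero.mp hlen)
    subst this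
    rw [outSpec] at h
    exact absurd h (by simp)
  | succ n ih =>
    intro R hlen k q h
    cases R with
    | nil => rw [outSpec] at h; exact absurd h (by simp)
    | cons k0 ks =>
      rw [outSpec] at h
      by_cases h2 : k = k0
      · rw [if_pos h2] at h
        by_cases hksnil : ks = []
        · rw [if_pos hksnil] at h
          cases h
          exact h2.symm
        · rw [if_neg hksnil] at h
          by_cases h3 : c.getD k0 0 +
              ((ks.takeWhile (fun j => decide (j - k0 ≤ thr))).map (fun j => c.getD j 0)).sum < cnt
          · rw [if_pos h3] at h; exact absurd h (by simp)
          · rw [if_neg h3] at h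
            cases h
            exact h2.symm
      · rw [if_neg h2] at h
        by_cases h1 : k ∈ ks.takeWhile (fun j => decide (j - k0 ≤ thr))
        · rw [if_pos h1] at h; exact absurd h (by simp)
        · rw [if_neg h1] at h
          exact ih _ (by
            have := List.length_dropWhile_le (fun j => decide (j - k0 ≤ thr)) ks
            simp only [List.length_cons] at hlen
            omega) k q h

lemma lookup_isSome_iff_mem_fst (l : List (Int × Int)) (a : Int) :
    (l.lookup a).isSome = true ↔ a ∈ l.map (·.1) := by
  induction l with
  | nil => simp
  | cons p t ih =>
    by_cases h : a = p.1
    · simp [List.lookup, h]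
    · have : (a == p.1) = false := by simpa using h
      simp [List.lookup, this, ih, h]

-- ===== B-side lemmas =====

lemma stepB_absorb (c : PySem.Dict Int Int) (thr k0 : Int) :
    ∀ (mem : List Int) (d : PySem.Dict Int Int) (a : Int),
      (∀ j ∈ mem, ¬ thr < j - k0) →
      mem.foldl (stepB c thr) (d.insert k0 a, some k0) =
        (d.insert k0 (a + (mem.map (fun j => c.getD j 0)).sum), some k0) := by
  intro mem
  induction mem with
  | nil => simp
  | cons j t ih =>
    intro d a hc
    have hj : ¬ thr < j - k0 := hc j (by simp)
    simp only [List.foldl_cons, stepB, if_neg hj]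
    rw [PySem.Dict.modify, PySem.Dict.getD_insert_self, PySem.Dict.insert_insert_self]
    rw [ih d _ (fun m hm => hc m (by simp [hm]))]
    simp [add_assoc]

lemma stepB_clusters (c : PySem.Dict Int Int) (thr : Int) :
    ∀ (n : Nat) (ks : List Int) (d : PySem.Dict Int Int) (s : Option Int), ks.length ≤ n →
      (∀ h k t', s = some h → ks = k :: t' → thr < k - h) →
      (ks.foldl (stepB c thr) (d, s)).1 =
        (totList c (clusters thr ks)).foldl (fun d p => d.insert p.1 p.2) d := by
  intro n
  induction n with
  | zero =>
    intro ks d s hlen _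
    have : ks = [] := List.eq_nil_of_length_eq_zero (Nat.le_zero.mp hlen)
    subst this
    simp [clusters, totList]
  | succ n ih =>
    intro ks d s hlen htrig
    cases ks with
    | nil => simp [clusters, totList]
    | cons k t =>
      have hstep : stepB c thr (d, s) k = (d.insert k (c.getD k 0), some k) := by
        cases s with
        | none => rfl
        | some h => simp [stepB, htrig h k t rfl rfl]
      simp only [List.foldl_cons, hstep]
      rw [← List.takeWhile_append_dropWhile (p := fun j => decide (j - k ≤ thr)) (l := t)]
      rw [List.foldl_append]
      rw [stepB_absorb c thr k _ d (c.getD k 0)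
        (fun j hj => by simpa using List.mem_takeWhile_imp hj)]
      rw [ih _ _ (some k)
        (by
          have h1 := List.length_dropWhile_le (fun j => decide (j - k ≤ thr)) t
          simp only [List.length_cons] at hlen
          omega)
        (by
          intro h k' t' hs hrest
          obtain rfl : k = h := by injection hs
          have := dropWhile_head_false _ _ _ _ hrest
          simp at this
          omega)]
      rw [clusters]
      simp only [totList, List.map_cons, List.foldl_cons]
      rw [List.takeWhile_append_dropWhile]

-- ===== assembly =====

lemma rectify_eq_spec (array : List Int) (thr cnt : Int) :
    rectify array thr cnt =
      ((((PySem.Dict.counter array (κ := Int)).items.filterMap (fun p =>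
          roleL cnt (totList (PySem.Dict.counter array)
            (clusters thr (PySem.List.sorted (PySem.Dict.counter array (κ := Int)).keys (fun x => x) false))) p.1)).length : Int),
        (PySem.Dict.counter array (κ := Int)).items.filterMap (fun p =>
          roleL cnt (totList (PySem.Dict.counter array)
            (clusters thr (PySem.List.sorted (PySem.Dict.counter array (κ := Int)).keys (fun x => x) false))) p.1)) := by
  simp only [rectify]
  set c := (PySem.Dict.counter array : PySem.Dict Int Int) with hc
  set key := PySem.List.sorted c.keys (fun x => x) false with hkey
  have hndk : c.keys.Nodup := PySem.Dict.nodup_keys_counter array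
  have hpwkey : key.Pairwise (· < ·) := by
    rw [hkey, hc, PySem.Dict.keys_counter]
    exact PySem.List.sorted_ofList_pairwise_lt array
  have hmemkey : ∀ x : Int, x ∈ key ↔ x ∈ c.keys := fun x => PySem.List.mem_sorted _ _ _ x
  have hinv : ∀ j ∈ key, c.get? j = some (c.getD j 0) := by
    intro j hj
    have hjk : j ∈ c.keys := (hmemkey j).mp hj
    have hs : (c.get? j).isSome := by
      rw [← PySem.Dict.contains_eq_isSome_get?]
      exact (PySem.Dict.contains_iff_mem_keys c j).mpr hjk
    obtain ⟨v, hv⟩ := Option.isSome_iff_exists.mp hs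
    rw [hv, PySem.Dict.getD_eq_get?_getD, hv]
    rfl
  have h2 := outerA_items thr cnt c key.length key c le_rfl hpwkey hinv hndk
  set kv2 := outerA thr cnt key c with hkv2
  have hallin : ∀ p ∈ c.items, p.1 ∈ key := by
    intro p hp
    exact (hmemkey p.1).mpr (List.mem_map_of_mem hp)
  set g1 : Int × Int → Option (Int × Int) := fun p => outSpec thr cnt c key p.1 with hg1
  have h2' : kv2.items = c.items.filterMap g1 := by
    rw [h2]
    exact List.filterMap_congr (fun p hp => by rw [if_pos (hallin p hp)])
  have hkeyPresG : keyPres g1 := fun p q hq =>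
    outSpec_key thr cnt c key.length key le_rfl p.1 q hq
  have hndl : (c.items.map (·.1)).Nodup := hndk
  have hkv2mk : kv2 = PySem.Dict.mk (c.items.filterMap g1) := PySem.Dict.ext h2'
  have hndk2 : kv2.keys.Nodup := by
    rw [hkv2mk]
    exact nodup_keys_mk_filterMap _ _ hkeyPresG hndl
  have h3 := finalFilter cnt kv2.keys kv2 hndk2 hndk2
  have h3' : (kv2.keys.foldl (fun d k => if d.getD k 0 < cnt then d.erase k else d) kv2).items
      = kv2.items.filter (fun p => !decide (p.2 < cnt)) := by
    rw [h3]
    apply List.filter_congr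
    intro p hp
    have hm : p.1 ∈ kv2.keys := List.mem_map_of_mem hp
    simp [hm]
  have h4 : kv2.items.filter (fun p => !decide (p.2 < cnt)) =
      c.items.filterMap (fun p => (g1 p).bind
        (fun y => if (!decide (y.2 < cnt)) = true then some y else none)) := by
    rw [h2', filter_filterMap_compose]
  have h5 : ∀ p ∈ c.items, (g1 p).bind
      (fun y => if (!decide (y.2 < cnt)) = true then some y else none)
      = roleL cnt (totList c (clusters thr key)) p.1 := by
    intro p hp
    have hb : (g1 p).bind (fun y => if (!decide (y.2 < cnt)) = true then some y else none)
        = (outSpec thr cnt c key p.1).bind (fun q => if q.2 < cnt then none else some q) := by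
      rw [hg1]
      cases h : outSpec thr cnt c key p.1 with
      | none => simp [h]
      | some q =>
        by_cases h2 : q.2 < cnt
        · simp [h, h2]
        · simp [h, h2, (by omega : cnt ≤ q.2)]
    rw [hb, outSpec_roleL thr cnt c key.length key le_rfl hpwkey p.1 (hallin p hp)]
  have hfinal : (kv2.keys.foldl (fun d k => if d.getD k 0 < cnt then d.erase k else d) kv2).items
      = c.items.filterMap (fun p => roleL cnt (totList c (clusters thr key)) p.1) := by
    rw [h3', h4]
    exact List.filterMap_congr h5
  rw [hfinal]

lemma rectify_alt_eq_spec (array : List Int) (thr cnt : Int) :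
    rectify_alt array thr cnt =
      ((((PySem.Dict.counter array (κ := Int)).items.filterMap (fun p =>
          roleL cnt (totList (PySem.Dict.counter array)
            (clusters thr (PySem.List.sorted (PySem.Dict.counter array (κ := Int)).keys (fun x => x) false))) p.1)).length : Int),
        (PySem.Dict.counter array (κ := Int)).items.filterMap (fun p =>
          roleL cnt (totList (PySem.Dict.counter array)
            (clusters thr (PySem.List.sorted (PySem.Dict.counter array (κ := Int)).keys (fun x => x) false))) p.1)) := by
  simp only [rectify_alt]
  set c := (PySem.Dict.counter array : PySem.Dict Int Int) with hc
  set key := PySem.List.sorted c.keys (fun x => x) false with hkey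
  set totL := totList c (clusters thr key) with htotL
  have hpwkey : key.Pairwise (· < ·) := by
    rw [hkey, hc, PySem.Dict.keys_counter]
    exact PySem.List.sorted_ofList_pairwise_lt array
  have hkeynd : key.Nodup := hpwkey.imp ne_of_lt
  have hB := stepB_clusters c thr key.length key PySem.Dict.empty none le_rfl
    (by intro h k t' hs _; cases hs)
  have hfstnd : (totL.map (·.1)).Nodup := by
    have h1 : totL.map (·.1) = (clusters thr key).map (·.1) := by
      simp [htotL, totList, List.map_map, Function.comp]
    rw [h1]
    have h2 := heads_sublist_flatC (clusters thr key)
    rw [flat_clusters] at h2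
    exact hkeynd.sublist h2
  have htget : ∀ x, ((key.foldl (stepB c thr) (PySem.Dict.empty, none)).1).get? x =
      if x ∈ totL.map (·.1) then totL.lookup x else none := by
    intro x
    rw [hB, get?_foldl_insert totL PySem.Dict.empty hfstnd x]
    by_cases hm : x ∈ totL.map (·.1) <;> simp [hm, PySem.Dict.get?_empty]
  set totals := (key.foldl (stepB c thr) (PySem.Dict.empty, none)).1 with htotals
  have h5 : ∀ k : Int, (if totals.contains k && decide (cnt ≤ totals.getD k 0)
      then some (k, totals.getD k 0) else none) = roleL cnt totL k := by
    intro k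
    rw [PySem.Dict.contains_eq_isSome_get?, PySem.Dict.getD_eq_get?_getD, htget k]
    by_cases hm : k ∈ totL.map (·.1)
    · obtain ⟨t, hlt⟩ := Option.isSome_iff_exists.mp
        ((lookup_isSome_iff_mem_fst totL k).mpr hm)
      rw [if_pos hm, hlt]
      by_cases h3 : t < cnt
      · simp [roleL, hlt, h3]
      · simp [roleL, hlt, h3, (by omega : cnt ≤ t)]
    · rw [if_neg hm]
      have : totL.lookup k = none := by
        cases h : totL.lookup k with
        | none => rfl
        | some t =>
          exact absurd ((lookup_isSome_iff_mem_fst totL k).mp (by rw [h]; rfl)) hm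
      simp [roleL, this]
  have hres : c.keys.filterMap (fun k =>
      if totals.contains k && decide (cnt ≤ totals.getD k 0)
      then some (k, totals.getD k 0) else none) =
      c.items.filterMap (fun p => roleL cnt totL p.1) := by
    rw [List.filterMap_congr (fun k _ => h5 k)]
    rw [show c.keys = c.items.map (·.1) from rfl, List.filterMap_map]
    rfl
  rw [hres]

-- ===== VERDICT (by name: the statement is the Claim_ definition above) =====
theorem rectify_spec : Claim_equal_rectify := by
  intro array thr cnt _
  unfold Spec_rectify
  rw [rectify_eq_spec, rectify_alt_eq_spec]
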